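-- pv_equiv track=rewrite | github.com/fullerzz/advent-of-code-2024 | src/advent_of_code/day_5.py | prereq_met
-- ===== SOURCE A (Python) =====
-- def prereq_met(update: list[int], prereq: int, val: int) -> bool:
--     prereq_index = -1
--     val_index = -1
--     for index, page in enumerate(update):
--         if page == val:
--             val_index = index
--         if page == prereq:
--             prereq_index = index
--     if prereq_index == -1:
--         return True
--     else:
--         return prereq_index < val_index
-- ===== SOURCE B (Python) =====
-- def last_index(xs, x):
--     """Index of the last occurrence of x in xs, or -1 if absent (back-to-front scan)."""
--     for i, p in reversed(list(enumerate(xs))):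
--         if p == x:
--             return i
--     return -1
--
--
-- def prereq_met(update: list[int], prereq: int, val: int) -> bool:
--     if prereq not in update:
--         return True
--     return last_index(update, prereq) < last_index(update, val)
-- ===== Notes on version B (the rewrite author's own statement) =====
-- stated objective: simpler
-- what changed: Replaces the single forward index-tracking scan over both targets with an early-out membership test plus a reusable back-to-front last_index helper that returns at the first hit.
import Mathlib
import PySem

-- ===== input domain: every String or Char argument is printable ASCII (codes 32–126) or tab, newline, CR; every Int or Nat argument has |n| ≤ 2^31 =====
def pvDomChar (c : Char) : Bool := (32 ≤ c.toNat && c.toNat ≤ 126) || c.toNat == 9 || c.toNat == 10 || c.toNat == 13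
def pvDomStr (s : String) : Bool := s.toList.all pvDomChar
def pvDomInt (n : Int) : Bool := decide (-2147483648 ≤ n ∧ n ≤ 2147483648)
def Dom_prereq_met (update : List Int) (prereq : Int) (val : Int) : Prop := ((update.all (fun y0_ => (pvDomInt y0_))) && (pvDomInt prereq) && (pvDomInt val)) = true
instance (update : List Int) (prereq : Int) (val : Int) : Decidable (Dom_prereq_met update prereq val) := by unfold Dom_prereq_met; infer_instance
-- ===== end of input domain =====

-- B replaces A's single forward scan tracking both last indices with an early-out
-- membership test plus a back-to-front last_index helper (objective: simpler).

-- ===== PORT A =====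
-- single forward pass over enumerate(update), remembering the last index of val and prereq
def prereq_met (update : List Int) (prereq : Int) (val : Int) : Bool :=
  let s := (PySem.List.enumerate update 0).foldl
    (fun (s : Int × Int) (ip : Int × Int) =>
      let val_index := if ip.2 == val then ip.1 else s.2
      let prereq_index := if ip.2 == prereq then ip.1 else s.1
      (prereq_index, val_index)) (-1, -1)
  if s.1 == -1 then true else decide (s.1 < s.2)

-- ===== PORT B =====
-- last_index: scan reversed(list(enumerate(xs))), return at first hit, else -1
def lastIndexAux (x : Int) : List (Int × Int) → Int
  | [] => -1
  | ip :: rest => if ip.2 == x then ip.1 else lastIndexAux x rest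

def lastIndex (xs : List Int) (x : Int) : Int :=
  lastIndexAux x (PySem.List.enumerate xs 0).reverse

def prereq_met_alt (update : List Int) (prereq : Int) (val : Int) : Bool :=
  if !(update.contains prereq) then true
  else decide (lastIndex update prereq < lastIndex update val)

-- ===== PRECONDITION & SPEC =====
def Spec_prereq_met (update : List Int) (prereq : Int) (val : Int) (out : Bool) : Prop := out = prereq_met_alt update prereq val
instance (update : List Int) (prereq : Int) (val : Int) (out : Bool) : Decidable (Spec_prereq_met update prereq val out) := by unfold Spec_prereq_met; infer_instance

-- ===== CLAIM (what is proved, stated in full; the proofs are below) =====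
def Claim_equal_prereq_met : Prop := ∀ (update : List Int) (prereq : Int) (val : Int), Dom_prereq_met update prereq val → Spec_prereq_met update prereq val (prereq_met update prereq val)

-- ===== LEMMAS AND PROOFS =====

-- the paired fold splits into two independent single-target folds
theorem foldl_pair_split (prereq val : Int) (l : List (Int × Int)) (s : Int × Int) :
    l.foldl (fun (s : Int × Int) (ip : Int × Int) =>
      let val_index := if ip.2 == val then ip.1 else s.2
      let prereq_index := if ip.2 == prereq then ip.1 else s.1
      (prereq_index, val_index)) s
    = (l.foldl (fun a ip => if ip.2 == prereq then ip.1 else a) s.1,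
       l.foldl (fun a ip => if ip.2 == val then ip.1 else a) s.2) := by
  induction l generalizing s with
  | nil => rfl
  | cons ip rest ih =>
    simp only [List.foldl_cons]
    exact ih _

-- a forward last-match fold from -1 equals the first match of the reversed list
theorem foldl_eq_lastIndexAux_reverse (x : Int) (l : List (Int × Int)) :
    l.foldl (fun a ip => if ip.2 == x then ip.1 else a) (-1) = lastIndexAux x l.reverse := by
  induction l using List.reverseRecOn with
  | nil => rfl
  | append_singleton l e ih =>
    simp only [List.foldl_append, List.foldl_cons, List.foldl_nil, List.reverse_append,
      List.reverse_cons, List.reverse_nil, List.nil_append, List.singleton_append,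
      lastIndexAux, ih]

theorem lastIndexAux_eq_neg_one (x : Int) (l : List (Int × Int))
    (hnn : ∀ p ∈ l, 0 ≤ p.1) :
    lastIndexAux x l = -1 ↔ ∀ p ∈ l, p.2 ≠ x := by
  induction l with
  | nil => simp [lastIndexAux]
  | cons ip rest ih =>
    have h0 : 0 ≤ ip.1 := hnn ip (by simp)
    by_cases h : ip.2 = x
    · simp only [lastIndexAux, h, beq_self_eq_true, if_true]
      constructor
      · intro he; omega
      · intro hall; exact absurd h (hall ip (by simp))
    · simp only [lastIndexAux, beq_iff_eq, h, if_false]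
      rw [ih (fun p hp => hnn p (List.mem_cons_of_mem _ hp))]
      simp [h]

theorem lastIndex_eq_neg_one_iff (xs : List Int) (x : Int) :
    lastIndex xs x = -1 ↔ ¬ xs.contains x := by
  unfold lastIndex
  rw [lastIndexAux_eq_neg_one]
  · constructor
    · intro hall hc
      have hx : x ∈ xs := by simpa using hc
      rw [← PySem.List.map_snd_enumerate xs 0] at hx
      obtain ⟨p, hp, hpx⟩ := List.mem_map.mp hx
      exact hall p (List.mem_reverse.mpr hp) hpx
    · intro hc p hp hpx
      apply hc
      have : p.2 ∈ (PySem.List.enumerate xs 0).map (·.2) :=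
        List.mem_map.mpr ⟨p, List.mem_reverse.mp hp, rfl⟩
      rw [PySem.List.map_snd_enumerate xs 0] at this
      simpa [hpx] using this
  · intro p hp
    obtain ⟨k, hk, rfl⟩ := (PySem.List.mem_enumerate_iff _ _ _).mp (List.mem_reverse.mp hp)
    simp

-- ===== VERDICT (by name: the statement is the Claim_ definition above) =====
theorem prereq_met_spec : Claim_equal_prereq_met := by
  intro update prereq val _
  unfold Spec_prereq_met prereq_met prereq_met_alt
  rw [foldl_pair_split]
  simp only [foldl_eq_lastIndexAux_reverse]
  change (if lastIndex update prereq == -1 then true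
          else decide (lastIndex update prereq < lastIndex update val)) = _
  by_cases h : update.contains prereq
  · have hne : lastIndex update prereq ≠ -1 := by
      intro he; exact ((lastIndex_eq_neg_one_iff update prereq).mp he) h
    simp only [h, Bool.not_true, Bool.false_eq_true, if_false]
    simp [hne]
  · have he : lastIndex update prereq = -1 := (lastIndex_eq_neg_one_iff update prereq).mpr h
    have hc : update.contains prereq = false := by simpa using h
    simp only [hc, Bool.not_false, if_true]
    simp [he]
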